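-- pv_equiv track=rewrite | github.com/kellaviietee/Python-projects | EX/ex06_regex/schedule.py | create_sorted_schedule_dictionary
-- ===== SOURCE A (Python) =====
-- def create_sorted_schedule_dictionary(schedule_list: list) -> dict:
--     """
--     Create a schedule dictionary out of schedule list.
--
--     Create schedule dictionary and group together timestamps.
--     :param schedule_list: list of times and activities
--     :return: Schedule dictionary
--     """
--     time_activity_dict = {}
--     for events in schedule_list:
--         hours = int(events[0])
--         minutes = int(events[1])
--         if hours < 24 and minutes < 59:
--             timestamp = f"{str(events[0]).zfill(2)}:{str(events[1]).zfill(2)}"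
--             if timestamp not in time_activity_dict.keys():
--                 time_activity_dict[timestamp] = [events[2].lower()]
--             elif timestamp in time_activity_dict.keys() and events[2].lower() in time_activity_dict[timestamp]:
--                 continue
--             else:
--                 time_activity_dict[timestamp].append(events[2].lower())
--     keys_sorted = sorted(time_activity_dict.keys())
--     sorted_dict = {}
--     for key in keys_sorted:
--         sorted_dict[key] = time_activity_dict[key]
--     return sorted_dict
-- ===== SOURCE B (Python) =====
-- def create_sorted_schedule_dictionary(schedule_list: list) -> dict:
--     """Collect valid events, sort the distinct timestamps, then gather each
--     timestamp's activities (deduped, first occurrence first) by a linear scan."""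
--     valid = [e for e in schedule_list if int(e[0]) < 24 and int(e[1]) < 59]
--
--     def ts(e):
--         return f"{str(e[0]).zfill(2)}:{str(e[1]).zfill(2)}"
--
--     def group(t):
--         acts = []
--         for e in valid:
--             if ts(e) == t:
--                 a = e[2].lower()
--                 if a not in acts:
--                     acts.append(a)
--         return acts
--
--     return {t: group(t) for t in sorted({ts(e) for e in valid})}
-- ===== Notes on version B (the rewrite author's own statement) =====
-- stated objective: alternative
-- what changed: Replaces the single-pass dict-of-lists grouping followed by key sort with a filter-valid / sort-distinct-timestamps / per-timestamp linear rescan decomposition (no incremental dict mutation).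
import Mathlib
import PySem

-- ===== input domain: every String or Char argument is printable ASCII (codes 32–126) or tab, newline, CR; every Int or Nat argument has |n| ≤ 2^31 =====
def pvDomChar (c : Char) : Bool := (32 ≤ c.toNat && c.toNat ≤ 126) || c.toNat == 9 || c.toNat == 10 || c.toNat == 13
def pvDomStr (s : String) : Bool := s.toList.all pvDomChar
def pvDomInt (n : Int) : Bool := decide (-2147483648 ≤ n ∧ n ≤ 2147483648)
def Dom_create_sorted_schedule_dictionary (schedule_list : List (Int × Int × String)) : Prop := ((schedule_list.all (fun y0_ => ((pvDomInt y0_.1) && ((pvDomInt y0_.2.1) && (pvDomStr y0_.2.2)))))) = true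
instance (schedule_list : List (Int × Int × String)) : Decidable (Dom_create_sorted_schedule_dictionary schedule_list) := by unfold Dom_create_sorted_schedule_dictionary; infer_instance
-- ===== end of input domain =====

-- B: filter the valid events, sort the distinct timestamps, then build each group by a linear
-- rescan — a different decomposition of the same task (no incremental dict mutation); same results.

-- shared helper: f"{str(h).zfill(2)}:{str(m).zfill(2)}" (both Pythons build the timestamp this way)
def pvTs (h m : Int) : String :=
  String.ofList (PySem.Chars.zfill (PySem.Int.toChars h) 2 ++ ':' :: PySem.Chars.zfill (PySem.Int.toChars m) 2)

-- ===== PORT A =====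
-- A's loop body, named (hours/minutes/timestamp and the branch order exactly as in the Python)
def pvStepA (d : PySem.Dict String (List String)) (events : Int × Int × String) : PySem.Dict String (List String) :=
  let hours := events.1
  let minutes := events.2.1
  if hours < 24 ∧ minutes < 59 then
    let timestamp := pvTs events.1 events.2.1
    if d.contains timestamp = false then
      d.insert timestamp [PySem.Str.lower events.2.2]
    else if d.contains timestamp = true ∧ PySem.Str.lower events.2.2 ∈ d.getD timestamp [] then
      d
    else
      d.modify timestamp [] (fun l => l ++ [PySem.Str.lower events.2.2])
  else d

def create_sorted_schedule_dictionary (schedule_list : List (Int × Int × String)) : List (String × List String) :=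
  let time_activity_dict := schedule_list.foldl pvStepA PySem.Dict.empty
  let keys_sorted := PySem.List.sorted time_activity_dict.keys (fun x => x) false
  -- time_activity_dict[key] with key always present: getD is exact here
  (keys_sorted.foldl (fun sd key => sd.insert key (time_activity_dict.getD key [])) PySem.Dict.empty).items

-- ===== PORT B =====
def create_sorted_schedule_dictionary_alt (schedule_list : List (Int × Int × String)) : List (String × List String) :=
  let valid := schedule_list.filter (fun e => decide (e.1 < 24) && decide (e.2.1 < 59))
  let keys := PySem.List.sorted (PySem.Set.ofList (valid.map (fun e => pvTs e.1 e.2.1))) (fun x => x) false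
  -- dict comprehension over the distinct sorted keys: appends one fresh pair per key
  keys.map (fun t => (t, valid.foldl (fun acts e =>
    if pvTs e.1 e.2.1 = t then
      (let a := PySem.Str.lower e.2.2; if a ∈ acts then acts else acts ++ [a])
    else acts) []))

-- ===== PRECONDITION & SPEC =====
def Spec_create_sorted_schedule_dictionary (schedule_list : List (Int × Int × String)) (out : List (String × List String)) : Prop := out = create_sorted_schedule_dictionary_alt schedule_list
instance (schedule_list : List (Int × Int × String)) (out : List (String × List String)) : Decidable (Spec_create_sorted_schedule_dictionary schedule_list out) := by unfold Spec_create_sorted_schedule_dictionary; infer_instance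

-- ===== CLAIM (what is proved, stated in full; the proofs are below) =====
def Claim_equal_create_sorted_schedule_dictionary : Prop := ∀ (schedule_list : List (Int × Int × String)), Dom_create_sorted_schedule_dictionary schedule_list → Spec_create_sorted_schedule_dictionary schedule_list (create_sorted_schedule_dictionary schedule_list)

-- ===== LEMMAS AND PROOFS =====

-- ===== VERDICT (by name: the statement is the Claim_ definition above) =====
lemma pvKeysA (l : List (Int × Int × String)) (d : PySem.Dict String (List String)) :
    (l.foldl pvStepA d).keys =
      PySem.Set.update d.keys ((l.filter (fun e => decide (e.1 < 24) && decide (e.2.1 < 59))).map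
        (fun e => pvTs e.1 e.2.1)) := by
  induction l generalizing d with
  | nil => simp [PySem.Set.update]
  | cons e l ih =>
    simp only [List.foldl_cons, List.filter_cons]
    by_cases hc : e.1 < 24 ∧ e.2.1 < 59
    · have hstep : (pvStepA d e).keys = PySem.Set.add d.keys (pvTs e.1 e.2.1) := by
        unfold pvStepA
        simp only [if_pos hc]
        by_cases hk : d.contains (pvTs e.1 e.2.1) = false
        · have hmem : pvTs e.1 e.2.1 ∉ d.keys := by
            rw [PySem.Dict.contains_eq_decide_mem_keys] at hk
            simpa using hk
          rw [if_pos hk, PySem.Dict.keys_insert_of_not_contains _ _ hk]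
          simp [PySem.Set.add, hmem]
        · have hk' : d.contains (pvTs e.1 e.2.1) = true := by
            cases h : d.contains (pvTs e.1 e.2.1) <;> simp_all
          have hmem : pvTs e.1 e.2.1 ∈ d.keys := by
            rw [PySem.Dict.contains_eq_decide_mem_keys] at hk'
            simpa using hk'
          rw [if_neg hk]
          by_cases hm : PySem.Str.lower e.2.2 ∈ d.getD (pvTs e.1 e.2.1) []
          · rw [if_pos ⟨hk', hm⟩]
            simp [PySem.Set.add, hmem]
          · rw [if_neg (by simp [hm])]
            rw [PySem.Dict.keys_modify, PySem.Dict.keys_insert_of_contains _ _ hk']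
            simp [PySem.Set.add, hmem]
      rw [if_pos (by simp [hc.1, hc.2]), List.map_cons]
      rw [ih, hstep]
      simp [PySem.Set.update]
    · have h1 : pvStepA d e = d := by
        unfold pvStepA; simp [if_neg hc]
      have h2 : (decide (e.1 < 24) && decide (e.2.1 < 59)) = false := by
        simp only [Bool.and_eq_false_iff, decide_eq_false_iff_not]
        by_contra h; push Not at h; exact hc ⟨h.1, h.2⟩
      rw [if_neg (by simp [h2]), h1, ih]

lemma pvGetDA (l : List (Int × Int × String)) (d : PySem.Dict String (List String)) (t : String) :
    (l.foldl pvStepA d).getD t [] =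
      (l.filter (fun e => decide (e.1 < 24) && decide (e.2.1 < 59))).foldl (fun acts e =>
        if pvTs e.1 e.2.1 = t then
          (let a := PySem.Str.lower e.2.2; if a ∈ acts then acts else acts ++ [a])
        else acts) (d.getD t []) := by
  induction l generalizing d with
  | nil => simp
  | cons e l ih =>
    simp only [List.foldl_cons, List.filter_cons]
    by_cases hc : e.1 < 24 ∧ e.2.1 < 59
    · have hstep : (pvStepA d e).getD t [] =
          (if pvTs e.1 e.2.1 = t then
            (let a := PySem.Str.lower e.2.2
             if a ∈ d.getD t [] then d.getD t [] else d.getD t [] ++ [a])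
          else d.getD t []) := by
        unfold pvStepA
        simp only [if_pos hc]
        by_cases ht : pvTs e.1 e.2.1 = t
        · subst ht
          by_cases hk : d.contains (pvTs e.1 e.2.1) = false
          · rw [if_pos hk, PySem.Dict.getD_insert_self]
            rw [PySem.Dict.getD_of_not_contains _ _ hk]
            simp
          · have hk' : d.contains (pvTs e.1 e.2.1) = true := by
              cases h : d.contains (pvTs e.1 e.2.1) <;> simp_all
            rw [if_neg hk]
            by_cases hm : PySem.Str.lower e.2.2 ∈ d.getD (pvTs e.1 e.2.1) []
            · rw [if_pos ⟨hk', hm⟩]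
              simp [hm]
            · rw [if_neg (by simp [hm])]
              rw [PySem.Dict.getD_modify_self]
              simp [hm]
        · have hne : t ≠ pvTs e.1 e.2.1 := fun h => ht h.symm
          by_cases hk : d.contains (pvTs e.1 e.2.1) = false
          · rw [if_pos hk, PySem.Dict.getD_insert_of_ne _ _ _ hne, if_neg ht]
          · rw [if_neg hk]
            by_cases hm : PySem.Str.lower e.2.2 ∈ d.getD (pvTs e.1 e.2.1) []
            · have hk' : d.contains (pvTs e.1 e.2.1) = true := by
                cases h : d.contains (pvTs e.1 e.2.1) <;> simp_all
              rw [if_pos ⟨hk', hm⟩, if_neg ht]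
            · rw [if_neg (by simp [hm]), PySem.Dict.getD_modify_of_ne _ _ _ hne, if_neg ht]
      rw [if_pos (by simp [hc.1, hc.2]), List.foldl_cons, ih, hstep]
    · have h1 : pvStepA d e = d := by
        unfold pvStepA; simp [if_neg hc]
      have h2 : (decide (e.1 < 24) && decide (e.2.1 < 59)) = false := by
        simp only [Bool.and_eq_false_iff, decide_eq_false_iff_not]
        by_contra h; push Not at h; exact hc ⟨h.1, h.2⟩
      rw [if_neg (by simp [h2]), h1, ih]

-- ===== VERDICT (by name: the statement is the Claim_ definition above) =====
theorem create_sorted_schedule_dictionary_spec : Claim_equal_create_sorted_schedule_dictionary := by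
  intro sl _
  unfold Spec_create_sorted_schedule_dictionary create_sorted_schedule_dictionary
    create_sorted_schedule_dictionary_alt
  simp only []
  have hkeys : (sl.foldl pvStepA PySem.Dict.empty).keys =
      PySem.Set.ofList ((sl.filter (fun e => decide (e.1 < 24) && decide (e.2.1 < 59))).map
        (fun e => pvTs e.1 e.2.1)) := by
    rw [pvKeysA]
    simp [PySem.Set.update, PySem.Set.ofList, PySem.Dict.keys_empty]
  rw [hkeys]
  set ks := PySem.List.sorted (PySem.Set.ofList
    ((sl.filter (fun e => decide (e.1 < 24) && decide (e.2.1 < 59))).map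
      (fun e => pvTs e.1 e.2.1))) (fun x => x) false with hks
  have hnodup : ks.Nodup := by
    have hperm := PySem.List.sorted_perm (PySem.Set.ofList
      ((sl.filter (fun e => decide (e.1 < 24) && decide (e.2.1 < 59))).map
        (fun e => pvTs e.1 e.2.1))) (fun x => x) false
    exact hperm.nodup_iff.mpr (PySem.Set.nodup_ofList _)
  rw [PySem.Dict.items_foldl_insert_fresh (k := fun key => key)
    (v := fun key => (sl.foldl pvStepA PySem.Dict.empty).getD key []) (l := ks)
    (d := PySem.Dict.empty)
    (by intro a _; exact PySem.Dict.contains_empty a)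
    (by simpa using hnodup)]
  show _ = _
  simp only [show (PySem.Dict.empty : PySem.Dict String (List String)).items = [] from rfl,
    List.nil_append]
  refine List.map_congr_left ?_
  intro t _
  rw [pvGetDA, PySem.Dict.getD_empty]
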